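-- pv_equiv track=rewrite | github.com/willis-tan/schoolwork | dsc20/labs/lab06/lab06.py | difference_of_counts
-- ===== SOURCE A (Python) =====
-- def difference_of_counts(string, target0, target1):
--     """
--     Given a `string` and two target characters `target0` and `target1`,
--     return the difference between the count of `target0` and the count of
--     `target1` in the `string`.
--
--     >>> difference_of_counts("ABCcccCBA", "A", "c")
--     -1
--     >>> difference_of_counts("ABCcccCBA", "A", "B")
--     0
--     >>> difference_of_counts("ABCcccCBA", "A", "a")
--     2
--     """
--     # YOUR CODE GOES HERE #
--     if len(string) == 0:
--         return 0
--
--     if string[0] == target0: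
--         return 1 + difference_of_counts(string[1:], target0, target1)
--     elif string[0] == target1:
--         return -1 + difference_of_counts(string[1:], target0, target1)
--     else:
--         return difference_of_counts(string[1:], target0, target1)
-- ===== SOURCE B (Python) =====
-- def difference_of_counts(string, target0, target1):
--     diff = 0
--     for ch in string:
--         if ch == target0:
--             diff += 1
--         elif ch == target1:
--             diff -= 1
--     return diff
-- ===== Notes on version B (the rewrite author's own statement) =====
-- stated objective: faster
-- what changed: Replaces recursion over string slices (which copies the tail at every step) with a single flat loop over the characters keeping an integer accumulator, preserving the target0-before-target1 branch order.
import Mathlib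
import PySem

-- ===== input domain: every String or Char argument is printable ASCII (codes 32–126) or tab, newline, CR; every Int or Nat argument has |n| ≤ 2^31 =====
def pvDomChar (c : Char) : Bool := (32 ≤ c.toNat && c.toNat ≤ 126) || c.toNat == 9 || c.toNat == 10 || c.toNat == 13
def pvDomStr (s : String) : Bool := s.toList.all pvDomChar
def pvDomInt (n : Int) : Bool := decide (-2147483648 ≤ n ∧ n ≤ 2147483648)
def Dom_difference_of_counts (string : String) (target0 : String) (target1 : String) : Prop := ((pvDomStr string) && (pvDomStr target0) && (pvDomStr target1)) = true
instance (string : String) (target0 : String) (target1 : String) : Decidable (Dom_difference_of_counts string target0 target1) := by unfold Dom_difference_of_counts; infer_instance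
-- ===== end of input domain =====

-- B replaces A's recursion over string slices by a single accumulator pass (faster: no tail copies).


-- ===== PORT A =====
-- A: recursion over the string, comparing the 1-char head string to target0/target1
def pvARec (cs : List Char) (t0 t1 : String) : Int :=
  match cs with
  | [] => 0
  | c :: rest =>
    if String.mk [c] = t0 then 1 + pvARec rest t0 t1
    else if String.mk [c] = t1 then -1 + pvARec rest t0 t1
    else pvARec rest t0 t1

def difference_of_counts (string : String) (target0 : String) (target1 : String) : Int :=
  pvARec string.toList target0 target1

-- ===== PORT B =====
-- B: one pass with an integer accumulator (Source B's for-loop as a foldl)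
def difference_of_counts_alt (string : String) (target0 : String) (target1 : String) : Int :=
  string.toList.foldl
    (fun diff ch =>
      if String.mk [ch] = target0 then diff + 1
      else if String.mk [ch] = target1 then diff - 1
      else diff) 0

-- ===== PRECONDITION & SPEC =====
def Spec_difference_of_counts (string : String) (target0 : String) (target1 : String) (out : Int) : Prop := out = difference_of_counts_alt string target0 target1
instance (string : String) (target0 : String) (target1 : String) (out : Int) : Decidable (Spec_difference_of_counts string target0 target1 out) := by unfold Spec_difference_of_counts; infer_instance

-- ===== CLAIM (what is proved, stated in full; the proofs are below) =====
def Claim_equal_difference_of_counts : Prop := ∀ (string : String) (target0 : String) (target1 : String), Dom_difference_of_counts string target0 target1 → Spec_difference_of_counts string target0 target1 (difference_of_counts string target0 target1)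

-- ===== LEMMAS AND PROOFS =====
theorem pv_fold_eq (cs : List Char) (t0 t1 : String) (acc : Int) :
    cs.foldl
      (fun diff ch =>
        if String.mk [ch] = t0 then diff + 1
        else if String.mk [ch] = t1 then diff - 1
        else diff) acc = acc + pvARec cs t0 t1 := by
  induction cs generalizing acc with
  | nil => simp [pvARec]
  | cons c rest ih =>
    simp only [List.foldl, pvARec]
    split_ifs <;> rw [ih] <;> ring

-- ===== VERDICT (by name: the statement is the Claim_ definition above) =====
theorem difference_of_counts_spec : Claim_equal_difference_of_counts := by
  intro s t0 t1 _
  unfold Spec_difference_of_counts difference_of_counts difference_of_counts_alt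
  rw [pv_fold_eq]; ring
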